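-- pv_equiv track=rewrite | github.com/wrCisco/numconversiongame | numconv.py | get_max_lengths
-- ===== SOURCE A (Python) =====
-- def get_max_lengths(scores:list) -> tuple:
--     max_len_names = 0
--     max_len_scores = 0
--     max_len_dates = 0
--     for n, s, d in scores:
--         if len(n) > max_len_names:
--             max_len_names = len(n)
--         if len(str(s)) > max_len_scores:
--             max_len_scores = len(str(s))
--         if len(d) > max_len_dates:
--             max_len_dates = len(d)
--     return max_len_names, max_len_scores, max_len_dates
-- ===== SOURCE B (Python) =====
-- def get_max_lengths(scores: list) -> tuple:
--     if not scores:
--         return 0, 0, 0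
--     n, s, d = scores[0]
--     rn, rs, rd = get_max_lengths(scores[1:])
--     return max(len(n), rn), max(len(str(s)), rs), max(len(d), rd)
-- ===== Notes on version B (the rewrite author's own statement) =====
-- stated objective: alternative
-- what changed: Replaces A's iterative single pass with three running accumulators by a structural recursion that computes the maxima of the tail first and combines them with the head's lengths via max (a right-fold, back-to-front, with no accumulator state).
import Mathlib
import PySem

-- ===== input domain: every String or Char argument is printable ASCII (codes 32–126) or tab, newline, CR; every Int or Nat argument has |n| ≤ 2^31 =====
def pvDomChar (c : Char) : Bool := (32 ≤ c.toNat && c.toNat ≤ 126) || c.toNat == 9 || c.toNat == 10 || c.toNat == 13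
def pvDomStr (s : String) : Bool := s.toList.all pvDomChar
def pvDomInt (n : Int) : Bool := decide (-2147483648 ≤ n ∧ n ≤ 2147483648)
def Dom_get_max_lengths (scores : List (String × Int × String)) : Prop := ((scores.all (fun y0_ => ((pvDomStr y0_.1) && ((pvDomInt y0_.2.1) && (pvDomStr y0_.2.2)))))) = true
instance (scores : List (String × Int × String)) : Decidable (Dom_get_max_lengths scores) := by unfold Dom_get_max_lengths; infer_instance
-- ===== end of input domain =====

-- B replaces A's iterative loop with three running accumulators by a structural
-- recursion combining the head's lengths with the tail's maxima (objective: alternative).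

-- ===== PORT A =====
-- the fused loop: three accumulators updated via the same if-comparisons
def get_max_lengths (scores : List (String × Int × String)) : Int × Int × Int :=
  scores.foldl
    (fun acc t =>
      let a1 := if PySem.Str.len t.1 > acc.1 then PySem.Str.len t.1 else acc.1
      let a2 := if PySem.Str.len (PySem.Int.toStr t.2.1) > acc.2.1 then PySem.Str.len (PySem.Int.toStr t.2.1) else acc.2.1
      let a3 := if PySem.Str.len t.2.2 > acc.2.2 then PySem.Str.len t.2.2 else acc.2.2
      (a1, a2, a3))
    (0, 0, 0)

-- ===== PORT B =====
-- structural recursion: maxima of the tail combined with the head via max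
def get_max_lengths_alt : List (String × Int × String) → Int × Int × Int
  | [] => (0, 0, 0)
  | (n, s, d) :: rest =>
      let r := get_max_lengths_alt rest
      (max (PySem.Str.len n) r.1,
       max (PySem.Str.len (PySem.Int.toStr s)) r.2.1,
       max (PySem.Str.len d) r.2.2)

-- ===== PRECONDITION & SPEC =====
def Spec_get_max_lengths (scores : List (String × Int × String)) (out : Int × Int × Int) : Prop := out = get_max_lengths_alt scores
instance (scores : List (String × Int × String)) (out : Int × Int × Int) : Decidable (Spec_get_max_lengths scores out) := by unfold Spec_get_max_lengths; infer_instance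

-- ===== CLAIM =====
def Claim_equal_get_max_lengths : Prop := ∀ (scores : List (String × Int × String)), Dom_get_max_lengths scores → Spec_get_max_lengths scores (get_max_lengths scores)

-- ===== LEMMAS AND PROOFS =====

theorem get_max_lengths_alt_nonneg (scores : List (String × Int × String)) :
    0 ≤ (get_max_lengths_alt scores).1 ∧ 0 ≤ (get_max_lengths_alt scores).2.1 ∧
      0 ≤ (get_max_lengths_alt scores).2.2 := by
  induction scores with
  | nil => simp [get_max_lengths_alt]
  | cons h t ih =>
      obtain ⟨n, s, d⟩ := h
      simp only [get_max_lengths_alt]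
      refine ⟨le_max_of_le_right ih.1, le_max_of_le_right ih.2.1, le_max_of_le_right ih.2.2⟩

theorem get_max_lengths_fold (scores : List (String × Int × String)) (a b c : Int)
    (ha : 0 ≤ a) (hb : 0 ≤ b) (hc : 0 ≤ c) :
    scores.foldl
      (fun acc t =>
        let a1 := if PySem.Str.len t.1 > acc.1 then PySem.Str.len t.1 else acc.1
        let a2 := if PySem.Str.len (PySem.Int.toStr t.2.1) > acc.2.1 then PySem.Str.len (PySem.Int.toStr t.2.1) else acc.2.1
        let a3 := if PySem.Str.len t.2.2 > acc.2.2 then PySem.Str.len t.2.2 else acc.2.2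
        ((a1, a2, a3) : Int × Int × Int))
      (a, b, c)
    = (max a (get_max_lengths_alt scores).1,
       max b (get_max_lengths_alt scores).2.1,
       max c (get_max_lengths_alt scores).2.2) := by
  induction scores generalizing a b c with
  | nil => simp [get_max_lengths_alt]; omega
  | cons h t ih =>
      obtain ⟨n, s, d⟩ := h
      simp only [List.foldl_cons, get_max_lengths_alt]
      rw [ih _ _ _ (by split_ifs <;> first | assumption | (simp [PySem.Str.len_eq]))
            (by split_ifs <;> first | assumption | (simp [PySem.Str.len_eq]))
            (by split_ifs <;> first | assumption | (simp [PySem.Str.len_eq]))]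
      have h1 : ∀ x y : Int, (if x > y then x else y) = max y x := fun x y => by
        split_ifs <;> omega
      rw [h1, h1, h1]
      refine Prod.ext ?_ (Prod.ext ?_ ?_) <;> simp <;> omega

-- ===== VERDICT =====
theorem get_max_lengths_spec : Claim_equal_get_max_lengths := by
  intro scores _
  unfold Spec_get_max_lengths get_max_lengths
  rw [get_max_lengths_fold scores 0 0 0 le_rfl le_rfl le_rfl]
  have h := get_max_lengths_alt_nonneg scores
  refine Prod.ext ?_ (Prod.ext ?_ ?_) <;> simp <;> omega
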